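-- pv_equiv track=rewrite | github.com/hatch514/pt | tetris.py | slideFromLeftWall
-- ===== SOURCE A (Python) =====
-- rightWallPoint = 9
--
-- def slideFromLeftWall(nowBlock,blockList):
--   leftEnd = rightWallPoint
--   for block in nowBlock:
--     leftEnd = block[0] if block[0] < leftEnd else leftEnd
--
--   maxSlide = 0
--   for block in nowBlock:
--     if block[0] == - 1:
--       slide = (block[0] - leftEnd) + 1
--       maxSlide = slide if slide > maxSlide else maxSlide
--   return maxSlide
-- ===== SOURCE B (Python) =====
-- rightWallPoint = 9
--
-- def slideFromLeftWall(nowBlock, blockList):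
--     xs = sorted(x for (x, y) in nowBlock)
--     if -1 in xs:
--         return -xs[0]
--     return 0
-- ===== Notes on version B (the rewrite author's own statement) =====
-- stated objective: alternative
-- what changed: Replaces A's two accumulating scans (running min with wall seed 9, then a running max of slides) by sort-then-inspect: B sorts the x-coordinates, tests membership of -1, and returns the negated head of the sorted list (no wall constant, no clamp), since a cell at x == -1 forces the sorted head to be the relevant minimum <= -1.
import Mathlib
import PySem

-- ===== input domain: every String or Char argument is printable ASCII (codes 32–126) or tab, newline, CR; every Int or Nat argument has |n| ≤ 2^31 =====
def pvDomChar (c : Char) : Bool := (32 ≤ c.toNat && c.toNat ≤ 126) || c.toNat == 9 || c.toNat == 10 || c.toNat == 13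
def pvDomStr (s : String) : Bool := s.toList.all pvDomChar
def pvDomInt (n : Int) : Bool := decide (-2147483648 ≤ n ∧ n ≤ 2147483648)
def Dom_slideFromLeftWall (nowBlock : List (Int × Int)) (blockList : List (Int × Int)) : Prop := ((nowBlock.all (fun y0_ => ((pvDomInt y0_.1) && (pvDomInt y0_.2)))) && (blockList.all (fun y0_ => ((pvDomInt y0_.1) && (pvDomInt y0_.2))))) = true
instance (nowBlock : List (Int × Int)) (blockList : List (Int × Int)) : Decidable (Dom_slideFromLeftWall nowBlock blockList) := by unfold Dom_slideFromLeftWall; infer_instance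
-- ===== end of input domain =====

-- B replaces A's two accumulating scans by sort-then-inspect: sort the x-coordinates, test
-- membership of -1, and return the negated sorted head; objective: alternative.

-- ===== PORT A =====
def slideFromLeftWall (nowBlock : List (Int × Int)) (blockList : List (Int × Int)) : Int :=
  let leftEnd := nowBlock.foldl (fun leftEnd block => if block.1 < leftEnd then block.1 else leftEnd) 9
  let maxSlide := nowBlock.foldl
    (fun maxSlide block =>
      if block.1 = -1 then
        let slide := (block.1 - leftEnd) + 1
        if slide > maxSlide then slide else maxSlide
      else maxSlide) 0
  maxSlide

-- ===== PORT B =====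
-- xs[0] is read only under the '-1 in xs' guard (xs nonempty there); ported as pyGetD xs 0 0
def slideFromLeftWall_alt (nowBlock : List (Int × Int)) (blockList : List (Int × Int)) : Int :=
  let xs := PySem.List.sorted (nowBlock.map (fun b => b.1)) (fun x => x) false
  if xs.contains (-1) then -(PySem.List.pyGetD xs 0 0) else 0

-- ===== PRECONDITION & SPEC =====
def Spec_slideFromLeftWall (nowBlock : List (Int × Int)) (blockList : List (Int × Int)) (out : Int) : Prop := out = slideFromLeftWall_alt nowBlock blockList
instance (nowBlock : List (Int × Int)) (blockList : List (Int × Int)) (out : Int) : Decidable (Spec_slideFromLeftWall nowBlock blockList out) := by unfold Spec_slideFromLeftWall; infer_instance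

-- ===== CLAIM (what is proved, stated in full; the proofs are below) =====
def Claim_equal_slideFromLeftWall : Prop := ∀ (nowBlock : List (Int × Int)) (blockList : List (Int × Int)), Dom_slideFromLeftWall nowBlock blockList → Spec_slideFromLeftWall nowBlock blockList (slideFromLeftWall nowBlock blockList)

-- ===== LEMMAS AND PROOFS =====

-- A's first loop is a seeded running min over the first components
theorem pv_leftEnd_eq (nb : List (Int × Int)) : ∀ a : Int,
    nb.foldl (fun leftEnd block => if block.1 < leftEnd then block.1 else leftEnd) a
      = (nb.map (fun b => b.1)).foldl min a := by
  induction nb with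
  | nil => intro a; rfl
  | cons b tl ih =>
      intro a
      simp only [List.foldl_cons, List.map_cons]
      rw [ih]
      congr 1
      simp [min_def]; split_ifs <;> omega

-- A's second loop collapses to an existence check with the constant slide -L
theorem pv_loop_eq (L : Int) (nb : List (Int × Int)) : ∀ m : Int,
    nb.foldl
      (fun maxSlide block =>
        if block.1 = -1 then
          let slide := (block.1 - L) + 1
          if slide > maxSlide then slide else maxSlide
        else maxSlide) m
      = if nb.any (fun b => b.1 == -1) then max (-L) m else m := by
  induction nb with
  | nil => intro m; rfl
  | cons b tl ih =>
      intro m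
      simp only [List.foldl_cons, List.any_cons]
      rw [ih]
      by_cases hb : b.1 = -1
      · simp only [hb]
        by_cases ht : tl.any (fun b => b.1 == -1) <;> simp [ht, max_def] <;> split_ifs <;> omega
      · have hbe : (b.1 == -1) = false := by
          simp only [beq_eq_false_iff_ne, ne_eq]; exact hb
        simp only [if_neg hb, hbe, Bool.false_or]

-- a seeded min-fold lands on the list minimum when the minimum is ≤ the seed
theorem pv_foldl_min_eq (xs : List Int) (m : Int) (hle : ∀ y ∈ xs, m ≤ y) :
    ∀ a : Int, m ≤ a → (m ∈ xs ∨ a = m) → xs.foldl min a = m := by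
  induction xs with
  | nil =>
      intro a _ hmem
      rcases hmem with h | h
      · exact absurd h (List.not_mem_nil)
      · simpa using h
  | cons x t ih =>
      intro a ha hmem
      have hx : m ≤ x := hle x (List.mem_cons_self)
      have hle' : ∀ y ∈ t, m ≤ y := fun y hy => hle y (List.mem_cons_of_mem _ hy)
      simp only [List.foldl_cons]
      by_cases hmt : m ∈ t
      · exact ih hle' (min a x) (le_min ha hx) (Or.inl hmt)
      · have haxm : min a x = m := by
          rcases hmem with h | h
          · rcases List.mem_cons.mp h with h' | h'
            · omega
            · exact absurd h' hmt
          · omega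
        exact ih hle' (min a x) (by omega) (Or.inr haxm)

-- ===== VERDICT (by name: the statement is the Claim_ definition above) =====
theorem slideFromLeftWall_spec : Claim_equal_slideFromLeftWall := by
  intro nb bl _
  show slideFromLeftWall nb bl = slideFromLeftWall_alt nb bl
  unfold slideFromLeftWall slideFromLeftWall_alt
  simp only [pv_leftEnd_eq, pv_loop_eq]
  set xs := nb.map (fun b => b.1) with hxs
  by_cases hmem : (-1 : Int) ∈ xs
  · have hany : (nb.any fun b => b.1 == -1) = true := by
      simp only [List.any_eq_true, beq_iff_eq]
      rcases List.mem_map.mp (hxs ▸ hmem) with ⟨b, hb, hb1⟩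
      exact ⟨b, hb, hb1⟩
    simp only [hany, if_pos]
    have hsmem : (-1 : Int) ∈ PySem.List.sorted xs (fun x => x) false :=
      (PySem.List.mem_sorted _ _ _ _).mpr hmem
    obtain ⟨m, t, hst⟩ : ∃ m t, PySem.List.sorted xs (fun x => x) false = m :: t := by
      cases hs : PySem.List.sorted xs (fun x => x) false with
      | nil => rw [hs] at hsmem; exact absurd hsmem (List.not_mem_nil)
      | cons m t => exact ⟨m, t, rfl⟩
    have hmle : ∀ y ∈ xs, m ≤ y := by
      have := PySem.List.key_head_sorted_le xs (fun x => x) hst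
      simpa using this
    have hm_mem : m ∈ xs := by
      have : m ∈ PySem.List.sorted xs (fun x => x) false := by
        rw [hst]; exact List.mem_cons_self
      exact (PySem.List.mem_sorted _ _ _ _).mp this
    have hm_le : m ≤ -1 := hmle _ hmem
    have hfold : xs.foldl min 9 = m :=
      pv_foldl_min_eq xs m hmle 9 (by omega) (Or.inl hm_mem)
    have hconS : (PySem.List.sorted xs (fun x => x) false).contains (-1) = true := by
      simpa [List.contains_eq_any_beq, eq_comm] using hsmem
    rw [if_pos hconS, hst, PySem.List.pyGetD_zero_cons,
      show xs.foldl min 9 = m from hfold, max_def]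
    split_ifs <;> omega
  · have hany : (nb.any fun b => b.1 == -1) = false := by
      simp only [List.any_eq_false, beq_iff_eq]
      intro b hb hb1
      exact hmem (hxs ▸ List.mem_map.mpr ⟨b, hb, hb1⟩)
    simp [hany]
    intro hc
    exact absurd hc hmem
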